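-- pv_equiv track=rewrite | github.com/daniel-reich/turbo-robot | APNhiaMCuRSwALN63_11.py | almost_palindrome
-- ===== SOURCE A (Python) =====
-- def almost_palindrome(txt):
--   backwardIndex = -1
--   invalidIndexes = []
--   almostPalindrome = False
--   # Obtain the indexes where the characters are not the same
--   for i in range(0, len(txt) // 2):
--     if txt[i] != txt[backwardIndex]:
--       invalidIndexes.append((i, backwardIndex))
--     backwardIndex -= 1
--   # Swap the characters where the characters are not the same
--   for (startingIndex, backwardIndex) in invalidIndexes:
--     chars = list(txt)
--     chars[backwardIndex] = chars[startingIndex]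
--     string = "".join(chars)
--     if string == string[::-1]:
--       return True
--   return almostPalindrome
-- ===== SOURCE B (Python) =====
-- def almost_palindrome(txt):
--     # One pass: count mismatched symmetric pairs; exactly one mismatch
--     # means a single character change yields a palindrome.
--     n = len(txt)
--     mismatches = 0
--     for i in range(n // 2):
--         if txt[i] != txt[n - 1 - i]:
--             mismatches += 1
--     return mismatches == 1
-- ===== Notes on version B (the rewrite author's own statement) =====
-- stated objective: faster
-- what changed: Instead of collecting mismatched index pairs and then, for each, rebuilding the whole string with one character swapped and comparing it to its reverse (quadratic), B counts mismatched symmetric pairs in a single pass and returns count == 1.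
import Mathlib
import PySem

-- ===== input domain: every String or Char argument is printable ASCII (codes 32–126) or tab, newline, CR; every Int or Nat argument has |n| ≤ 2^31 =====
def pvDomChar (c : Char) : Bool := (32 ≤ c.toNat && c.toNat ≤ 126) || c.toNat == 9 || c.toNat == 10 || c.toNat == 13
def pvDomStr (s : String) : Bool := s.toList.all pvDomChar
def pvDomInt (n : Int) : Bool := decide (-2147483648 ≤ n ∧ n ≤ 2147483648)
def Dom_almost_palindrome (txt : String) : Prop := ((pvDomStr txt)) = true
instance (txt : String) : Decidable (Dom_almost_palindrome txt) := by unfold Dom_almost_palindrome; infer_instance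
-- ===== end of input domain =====

-- B replaces A's quadratic try-every-swap phase by a single mismatch count (faster, asymptotic).

-- ===== PORT A =====
-- second loop of A: for each recorded (startingIndex, backwardIndex) pair, swap and test;
-- the indices produced by A's first loop are always in range, so pyGetD/pySetD are exact here.
def apTry (s : List Char) : List (Int × Int) → Bool
  | [] => false
  | (startingIndex, backwardIndex) :: rest =>
    let chars := PySem.List.pySetD s backwardIndex (PySem.List.pyGetD s startingIndex ' ')
    let string := String.ofList chars
    if string == (PySem.Str.slice? string none none (-1)).getD "" then true
    else apTry s rest

def almost_palindrome (txt : String) : Bool :=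
  let s := txt.toList
  -- first loop over range(0, len(txt)//2) with state (backwardIndex, invalidIndexes)
  let st := (PySem.List.pyRange 0 ((s.length / 2 : Nat) : Int) 1).foldl
    (fun (st : Int × List (Int × Int)) i =>
      if PySem.List.pyGetD s i ' ' ≠ PySem.List.pyGetD s st.1 ' '
      then (st.1 - 1, st.2 ++ [(i, st.1)])
      else (st.1 - 1, st.2))
    (-1, [])
  apTry s st.2

-- ===== PORT B =====
def almost_palindrome_alt (txt : String) : Bool :=
  let s := txt.toList
  let n := s.length
  let mismatches := (PySem.List.pyRange 0 ((n / 2 : Nat) : Int) 1).foldl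
    (fun (acc : Int) i =>
      if PySem.List.pyGetD s i ' ' ≠ PySem.List.pyGetD s ((n : Int) - 1 - i) ' '
      then acc + 1 else acc)
    0
  mismatches == 1

-- ===== PRECONDITION & SPEC =====
def Spec_almost_palindrome (txt : String) (out : Bool) : Prop := out = almost_palindrome_alt txt
instance (txt : String) (out : Bool) : Decidable (Spec_almost_palindrome txt out) := by unfold Spec_almost_palindrome; infer_instance

-- ===== CLAIM (what is proved, stated in full; the proofs are below) =====
def Claim_equal_almost_palindrome : Prop := ∀ (txt : String), Dom_almost_palindrome txt → Spec_almost_palindrome txt (almost_palindrome txt)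

-- ===== LEMMAS AND PROOFS =====

-- indexes i < k whose symmetric pair mismatches
def mismN (s : List Char) (k : Nat) : List Nat :=
  (List.range k).filter (fun i => decide (s.getD i ' ' ≠ s.getD (s.length - 1 - i) ' '))

theorem mem_mismN (s : List Char) (k i : Nat) :
    i ∈ mismN s k ↔ i < k ∧ s.getD i ' ' ≠ s.getD (s.length - 1 - i) ' ' := by
  simp [mismN, List.mem_filter, List.mem_range]

theorem nodup_mismN (s : List Char) (k : Nat) : (mismN s k).Nodup :=
  (List.nodup_range).filter _

theorem mismN_succ (s : List Char) (k : Nat) :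
    mismN s (k + 1) = mismN s k ++
      (if s.getD k ' ' ≠ s.getD (s.length - 1 - k) ' ' then [k] else []) := by
  unfold mismN
  rw [List.range_succ, List.filter_append]
  congr 1
  by_cases h : s.getD k ' ' ≠ s.getD (s.length - 1 - k) ' '
  · rw [if_pos h]
    simp only [List.filter_cons, List.filter_nil]
    rw [if_pos (by simpa using h)]
  · rw [if_neg h]
    simp only [List.filter_cons, List.filter_nil]
    rw [if_neg (by simpa using h)]

-- the pyGetD at the negative running index equals the symmetric getD
theorem pyGetD_neg_symm (s : List Char) (k : Nat) (hk : k < s.length / 2) :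
    PySem.List.pyGetD s (-(k : Int) - 1) ' ' = s.getD (s.length - 1 - k) ' ' := by
  have h1 : (-(k : Int) - 1) = -((k + 1 : Nat) : Int) := by push_cast; ring
  have h2 : (k + 1 : Nat) ≤ s.length := by omega
  rw [h1, PySem.List.pyGetD_neg_natCast s (k + 1) ' ' (by omega) h2]
  have h3 : s.length - (k + 1) = s.length - 1 - k := by omega
  rw [List.getD_eq_getElem s ' ' (show s.length - 1 - k < s.length by omega)]
  simp [h3]

-- A's first loop computes (-(k)-1, mismN s k) after k steps
theorem aLoop_eq (s : List Char) (k : Nat) (hk : k ≤ s.length / 2) :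
    (PySem.List.pyRange 0 (k : Int) 1).foldl
      (fun (st : Int × List (Int × Int)) i =>
        if PySem.List.pyGetD s i ' ' ≠ PySem.List.pyGetD s st.1 ' '
        then (st.1 - 1, st.2 ++ [(i, st.1)])
        else (st.1 - 1, st.2))
      (-1, [])
    = (-(k : Int) - 1, (mismN s k).map (fun (i : Nat) => ((i : Int), -(i : Int) - 1))) := by
  induction k with
  | zero => simp [PySem.List.pyRange_one_eq_nil, mismN]
  | succ k ih =>
    have hk' : k ≤ s.length / 2 := by omega
    have hcast : ((k + 1 : Nat) : Int) = (k : Int) + 1 := by push_cast; ring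
    rw [hcast, PySem.List.pyRange_one_succ_right (by positivity), List.foldl_append, ih hk']
    simp only [List.foldl_cons, List.foldl_nil]
    rw [PySem.List.pyGetD_natCast, pyGetD_neg_symm s k (by omega)]
    rw [mismN_succ]
    by_cases h : s.getD k ' ' ≠ s.getD (s.length - 1 - k) ' '
    · rw [if_pos h, if_pos h, List.map_append]
      simp only [Prod.mk.injEq, List.map_cons, List.map_nil]
      exact ⟨by push_cast; ring, by simp⟩
    · rw [if_neg h, if_neg h, List.append_nil]
      simp only [Prod.mk.injEq]
      exact ⟨by push_cast; ring, by simp⟩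

-- B's loop counts mismN
theorem bLoop_eq (s : List Char) (k : Nat) (hk : k ≤ s.length / 2) :
    (PySem.List.pyRange 0 (k : Int) 1).foldl
      (fun (acc : Int) i =>
        if PySem.List.pyGetD s i ' ' ≠ PySem.List.pyGetD s ((s.length : Int) - 1 - i) ' '
        then acc + 1 else acc)
      0
    = ((mismN s k).length : Int) := by
  induction k with
  | zero => simp [PySem.List.pyRange_one_eq_nil, mismN]
  | succ k ih =>
    have hk' : k ≤ s.length / 2 := by omega
    have hcast : ((k + 1 : Nat) : Int) = (k : Int) + 1 := by push_cast; ring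
    have hsym : ((s.length : Int) - 1 - (k : Int)) = ((s.length - 1 - k : Nat) : Int) := by
      have : k < s.length := by omega
      push_cast; omega
    rw [hcast, PySem.List.pyRange_one_succ_right (by positivity), List.foldl_append, ih hk']
    simp only [List.foldl_cons, List.foldl_nil]
    rw [PySem.List.pyGetD_natCast, hsym, PySem.List.pyGetD_natCast]
    rw [mismN_succ]
    by_cases h : s.getD k ' ' ≠ s.getD (s.length - 1 - k) ' '
    · rw [if_pos h, if_pos h]
      simp [List.length_append]
    · rw [if_neg h, if_neg h, List.append_nil]

-- the swapped list A builds for a recorded pair (i, -(i+1))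
def swapAt (s : List Char) (i : Nat) : List Char :=
  s.set (s.length - 1 - i) (s.getD i ' ')

theorem length_swapAt (s : List Char) (i : Nat) : (swapAt s i).length = s.length := by
  simp [swapAt]

theorem pySetD_neg (s : List Char) (i : Nat) (hi : i + 1 ≤ s.length) :
    PySem.List.pySetD s (-(i : Int) - 1) (PySem.List.pyGetD s (i : Int) ' ') = swapAt s i := by
  rw [PySem.List.pyGetD_natCast]
  simp only [PySem.List.pySetD, PySem.List.pySet?, PySem.List.pyIdx?, swapAt]
  have h1 : ¬ (0 ≤ -(i : Int) - 1) := by omega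
  have h2 : -(s.length : Int) ≤ -(i : Int) - 1 := by omega
  have h3 : (-(-(i : Int) - 1)).toNat = i + 1 := by omega
  simp only [if_neg h1, if_pos h2, h3]
  have h4 : s.length - (i + 1) = s.length - 1 - i := by omega
  simp [h4]

theorem apTry_cons (s : List Char) (i : Nat) (hi : i + 1 ≤ s.length) (rest : List (Int × Int)) :
    apTry s (((i : Int), -(i : Int) - 1) :: rest)
    = if (swapAt s i).reverse = swapAt s i then true else apTry s rest := by
  show (if String.ofList (PySem.List.pySetD s (-(i : Int) - 1) (PySem.List.pyGetD s ((i : Int)) ' '))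
          == (PySem.Str.slice? (String.ofList (PySem.List.pySetD s (-(i : Int) - 1)
               (PySem.List.pyGetD s ((i : Int)) ' '))) none none (-1)).getD ""
        then true else apTry s rest) = _
  rw [pySetD_neg s i hi, PySem.Str.slice?_none_none_neg_one, Option.getD_some]
  by_cases hp : (swapAt s i).reverse = swapAt s i
  · have h1 : (String.ofList (swapAt s i)).toList.reverse = swapAt s i := by simp [hp]
    rw [h1]
    simp [hp]
  · have h1 : (String.ofList (swapAt s i)
        == String.ofList ((String.ofList (swapAt s i)).toList.reverse)) = false := by
      apply beq_eq_false_iff_ne.mpr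
      intro hb
      apply hp
      have := congrArg String.toList hb
      simpa using this.symm
    rw [h1]
    simp [hp]

-- a single mismatch at i, all other pairs equal: the swap yields a palindrome
theorem swap_pal (s : List Char) (i : Nat) (hi : i < s.length / 2)
    (hall : ∀ j, j < s.length / 2 → j ≠ i → s.getD j ' ' = s.getD (s.length - 1 - j) ' ') :
    (swapAt s i).reverse = swapAt s i := by
  have hn : i + 1 ≤ s.length := by omega
  have hiv : s.getD i ' ' = s[i]'(by omega) := List.getD_eq_getElem s ' ' (by omega)
  have key : ∀ j, (hj : j < s.length) →
      (swapAt s i)[j]'(by rw [length_swapAt]; omega)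
        = (swapAt s i)[s.length - 1 - j]'(by rw [length_swapAt]; omega) := by
    intro j hj
    simp only [swapAt, List.getElem_set]
    by_cases hmidj : s.length - 1 - j = j
    · simp only [hmidj]
    rcases Nat.lt_or_ge j (s.length / 2) with hjlt | hjge
    · -- j in the first half
      by_cases hji : j = i
      · subst hji
        rw [if_neg (by omega), if_pos (by omega)]
        exact hiv.symm
      · rw [if_neg (by omega), if_neg (by omega)]
        have := hall j hjlt hji
        rw [List.getD_eq_getElem s ' ' (by omega), List.getD_eq_getElem s ' ' (by omega)] at this
        exact this
    · -- j in the second half; its mirror j2 is in the first half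
      have hj2lt : s.length - 1 - j < s.length / 2 := by omega
      by_cases hji : s.length - 1 - j = i
      · rw [if_pos (by omega), if_neg (by omega)]
        simp only [hji]
        exact hiv
      · rw [if_neg (by omega), if_neg (by omega)]
        have := hall (s.length - 1 - j) hj2lt hji
        rw [List.getD_eq_getElem s ' ' (by omega), List.getD_eq_getElem s ' ' (by omega)] at this
        have hx : s.length - 1 - (s.length - 1 - j) = j := by omega
        simp only [hx] at this
        exact this.symm
  apply List.ext_getElem (by simp [swapAt])
  intro j h1 h2
  rw [List.getElem_reverse]
  simp only [length_swapAt]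
  exact (key j (by simpa [swapAt] using h2)).symm

-- a surviving mismatch at j ≠ k: the swap at k is not a palindrome
theorem swap_not_pal (s : List Char) (k j : Nat) (hk : k < s.length / 2) (hj : j < s.length / 2)
    (hjk : j ≠ k) (hmis : s.getD j ' ' ≠ s.getD (s.length - 1 - j) ' ') :
    (swapAt s k).reverse ≠ swapAt s k := by
  intro h
  apply hmis
  have hjlen : j < s.length := by omega
  have h0 : (swapAt s k).reverse[j]? = (swapAt s k)[j]? := by rw [h]
  rw [List.getElem?_reverse (by simp [swapAt]; omega)] at h0
  simp only [length_swapAt] at h0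
  have hne1 : s.length - 1 - k ≠ s.length - 1 - j := by omega
  have hne2 : s.length - 1 - k ≠ j := by omega
  simp only [swapAt, List.getElem?_set, if_neg hne1, if_neg hne2] at h0
  rw [List.getElem?_eq_getElem (show s.length - 1 - j < s.length by omega)] at h0
  rw [List.getElem?_eq_getElem (show j < s.length by omega)] at h0
  have h1 := Option.some.inj h0
  rw [List.getD_eq_getElem s ' ' (by omega), List.getD_eq_getElem s ' ' (by omega)]
  exact h1.symm

theorem apTry_all_false (s : List Char) (l : List Nat)
    (hlen : ∀ i ∈ l, i + 1 ≤ s.length)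
    (hfail : ∀ i ∈ l, (swapAt s i).reverse ≠ swapAt s i) :
    apTry s (l.map (fun (i : Nat) => ((i : Int), -(i : Int) - 1))) = false := by
  induction l with
  | nil => rfl
  | cons i t ih =>
    rw [List.map_cons, apTry_cons s i (hlen i (by simp)) _]
    rw [if_neg (hfail i (by simp))]
    exact ih (fun x hx => hlen x (by simp [hx])) (fun x hx => hfail x (by simp [hx]))

-- ===== VERDICT (by name: the statement is the Claim_ definition above) =====
theorem almost_palindrome_spec : Claim_equal_almost_palindrome := by
  intro txt _
  show almost_palindrome txt = almost_palindrome_alt txt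
  show apTry txt.toList
      ((List.foldl
        (fun (st : Int × List (Int × Int)) i =>
          if PySem.List.pyGetD txt.toList i ' ' ≠ PySem.List.pyGetD txt.toList st.1 ' '
          then (st.1 - 1, st.2 ++ [(i, st.1)])
          else (st.1 - 1, st.2))
        ((-1 : Int), ([] : List (Int × Int)))
        (PySem.List.pyRange 0 ((txt.toList.length / 2 : Nat) : Int) 1)).2)
    = ((List.foldl
        (fun (acc : Int) i =>
          if PySem.List.pyGetD txt.toList i ' '
              ≠ PySem.List.pyGetD txt.toList ((txt.toList.length : Int) - 1 - i) ' '
          then acc + 1 else acc)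
        0 (PySem.List.pyRange 0 ((txt.toList.length / 2 : Nat) : Int) 1)) == 1)
  generalize txt.toList = s
  rw [aLoop_eq s (s.length / 2) (le_refl _), bLoop_eq s (s.length / 2) (le_refl _)]
  show apTry s ((mismN s (s.length / 2)).map (fun (i : Nat) => ((i : Int), -(i : Int) - 1)))
      = (((mismN s (s.length / 2)).length : Int) == 1)
  have hmem : ∀ i ∈ mismN s (s.length / 2),
      i < s.length / 2 ∧ s.getD i ' ' ≠ s.getD (s.length - 1 - i) ' ' := by
    intro i hi; exact (mem_mismN s (s.length / 2) i).mp hi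
  match hML : mismN s (s.length / 2) with
  | [] =>
    simp [apTry]
  | [i] =>
    obtain ⟨hi, hmis⟩ := hmem i (by rw [hML]; simp)
    have hn1 : i + 1 ≤ s.length := by omega
    rw [List.map_cons, List.map_nil, apTry_cons s i hn1 []]
    rw [if_pos]
    · simp
    · apply swap_pal s i hi
      intro j hj hji
      by_contra hne
      have hjm : j ∈ mismN s (s.length / 2) := (mem_mismN s (s.length / 2) j).mpr ⟨hj, hne⟩
      rw [hML] at hjm; simp at hjm; exact hji hjm
  | i :: j :: rest =>
    have hnd := nodup_mismN s (s.length / 2)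
    rw [hML] at hnd
    have hij : i ≠ j := by
      intro hcontr; subst hcontr; simp at hnd
    have hi := hmem i (by rw [hML]; simp)
    have hj := hmem j (by rw [hML]; simp)
    rw [apTry_all_false s (i :: j :: rest)
      (fun x hx => by have := hmem x (by rw [hML]; exact hx); omega)
      (fun x hx => by
        by_cases hxi : x = i
        · subst hxi
          exact swap_not_pal s x j hi.1 hj.1 (fun hcc => hij hcc.symm) hj.2
        · have hx' := hmem x (by rw [hML]; exact hx)
          exact swap_not_pal s x i hx'.1 hi.1 (fun hcc => hxi hcc.symm) hi.2)]
    have hne1 : (((i :: j :: rest).length : Nat) : Int) ≠ 1 := by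
      simp only [List.length_cons]
      push_cast
      omega
    rw [show ((((i :: j :: rest).length : Nat) : Int) == 1) = false from
      beq_eq_false_iff_ne.mpr hne1]
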